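-- pv_equiv track=rewrite | github.com/kvesik/dissertation | scripts/generate_tableaux_otsoft_stress.py | add_stresses
-- ===== SOURCE A (Python) =====
-- def add_stresses(list_of_elements, cand_so_far=""):
--     if len(list_of_elements) == 0:
--         # base case
--         return [cand_so_far]
--     else:
--         cands_at_this_level = []
--         el0 = list_of_elements[0]
--         if not el0.startswith("("):
--             # if the first element is not footed, just leave it as is
--             for option in add_stresses(list_of_elements[1:], cand_so_far + (" " if cand_so_far else "") + el0):
--                 cands_at_this_level.append(option)
--         elif " " not in el0:
--             # if the first element is a single-syllable foot, stress it
--             for option in add_stresses(list_of_elements[1:], cand_so_far + (" " if cand_so_far else "") + el0[:2] + "2" + el0[2:]):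
--                 cands_at_this_level.append(option)
--         else:
--             # the first element is a two-syllable foot, so try stressing either of the two syllables
--             trochee = el0[:2] + "2" + el0[2:]
--             iamb = el0[:4] + "2" + el0[4:]
--             for option_t in add_stresses(list_of_elements[1:], cand_so_far + (" " if cand_so_far else "") + trochee):
--                 cands_at_this_level.append(option_t)
--             for option_i in add_stresses(list_of_elements[1:], cand_so_far + (" " if cand_so_far else "") + iamb):
--                 cands_at_this_level.append(option_i)
--         return cands_at_this_level
-- ===== SOURCE B (Python) =====
-- def add_stresses(list_of_elements, cand_so_far=""):
--     option_lists = []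
--     for el in list_of_elements:
--         if not el.startswith("("):
--             option_lists.append([el])
--         elif " " not in el:
--             option_lists.append([el[:2] + "2" + el[2:]])
--         else:
--             option_lists.append([el[:2] + "2" + el[2:], el[:4] + "2" + el[4:]])
--     cands = [cand_so_far]
--     for opts in option_lists:
--         cands = [c + (" " if c else "") + o for c in cands for o in opts]
--     return cands
-- ===== Notes on version B (the rewrite author's own statement) =====
-- stated objective: simpler
-- what changed: Replaced the recursive DFS (which re-slices the element list and threads a growing accumulator string through every call) by a single pass building a per-element list of stress options followed by an iterative Cartesian-product fold over those option lists.
import Mathlib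
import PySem

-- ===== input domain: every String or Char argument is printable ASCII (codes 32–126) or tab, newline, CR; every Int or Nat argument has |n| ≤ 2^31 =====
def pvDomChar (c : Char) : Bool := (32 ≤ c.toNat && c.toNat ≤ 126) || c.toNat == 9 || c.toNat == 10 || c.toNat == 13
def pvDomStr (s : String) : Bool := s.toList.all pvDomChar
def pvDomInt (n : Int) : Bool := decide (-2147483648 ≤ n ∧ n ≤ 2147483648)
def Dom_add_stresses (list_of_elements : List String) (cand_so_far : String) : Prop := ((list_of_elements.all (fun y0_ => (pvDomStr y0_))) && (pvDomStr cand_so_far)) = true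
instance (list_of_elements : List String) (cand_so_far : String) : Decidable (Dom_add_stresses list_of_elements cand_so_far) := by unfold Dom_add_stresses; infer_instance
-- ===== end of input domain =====

-- B replaces A's recursive DFS with one pass building per-element option lists followed by an
-- iterative Cartesian-product fold (objective: simpler; same output, same order).

-- Python string concatenation, exact on code points
def strCat (a b : String) : String := String.ofList (a.toList ++ b.toList)

-- cand_so_far + (" " if cand_so_far else "") + el  — the expression both Pythons contain verbatim
def pyJoin (c el : String) : String := strCat (strCat c (if c = "" then "" else " ")) el

-- ===== PORT A =====
def add_stresses (list_of_elements : List String) (cand_so_far : String) : List String :=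
  match list_of_elements with
  | [] => [cand_so_far]
  | el0 :: rest =>
    if (PySem.Str.startswith el0 "(") = false then
      -- unfooted: leave it as is
      (add_stresses rest (pyJoin cand_so_far el0)).foldl (fun acc o => acc ++ [o]) []
    else if (PySem.Str.isIn " " el0) = false then
      -- single-syllable foot: stress it
      (add_stresses rest (pyJoin cand_so_far
        (strCat (strCat (PySem.Str.slice el0 none (some 2)) "2") (PySem.Str.slice el0 (some 2) none)))).foldl
        (fun acc o => acc ++ [o]) []
    else
      -- two-syllable foot: trochee then iamb
      let trochee := strCat (strCat (PySem.Str.slice el0 none (some 2)) "2") (PySem.Str.slice el0 (some 2) none)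
      let iamb := strCat (strCat (PySem.Str.slice el0 none (some 4)) "2") (PySem.Str.slice el0 (some 4) none)
      let afterT := (add_stresses rest (pyJoin cand_so_far trochee)).foldl (fun acc o => acc ++ [o]) []
      (add_stresses rest (pyJoin cand_so_far iamb)).foldl (fun acc o => acc ++ [o]) afterT

-- ===== PORT B =====
def add_stresses_alt (list_of_elements : List String) (cand_so_far : String) : List String :=
  let option_lists := list_of_elements.foldl (fun acc el =>
    acc ++ [if (PySem.Str.startswith el "(") = false then [el]
            else if (PySem.Str.isIn " " el) = false then
              [strCat (strCat (PySem.Str.slice el none (some 2)) "2") (PySem.Str.slice el (some 2) none)]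
            else
              [strCat (strCat (PySem.Str.slice el none (some 2)) "2") (PySem.Str.slice el (some 2) none),
               strCat (strCat (PySem.Str.slice el none (some 4)) "2") (PySem.Str.slice el (some 4) none)]]) []
  option_lists.foldl (fun cands opts => cands.flatMap (fun c => opts.map (fun o => pyJoin c o))) [cand_so_far]

-- ===== PRECONDITION & SPEC =====
def Spec_add_stresses (list_of_elements : List String) (cand_so_far : String) (out : List String) : Prop := out = add_stresses_alt list_of_elements cand_so_far
instance (list_of_elements : List String) (cand_so_far : String) (out : List String) : Decidable (Spec_add_stresses list_of_elements cand_so_far out) := by unfold Spec_add_stresses; infer_instance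

-- ===== CLAIM (what is proved, stated in full; the proofs are below) =====
def Claim_equal_add_stresses : Prop := ∀ (list_of_elements : List String) (cand_so_far : String), Dom_add_stresses list_of_elements cand_so_far → Spec_add_stresses list_of_elements cand_so_far (add_stresses list_of_elements cand_so_far)

-- ===== LEMMAS AND PROOFS =====

-- B's per-element option list, as a function (proof-side name for the body of B's first loop)
def optsFn (el : String) : List String :=
  if (PySem.Str.startswith el "(") = false then [el]
  else if (PySem.Str.isIn " " el) = false then
    [strCat (strCat (PySem.Str.slice el none (some 2)) "2") (PySem.Str.slice el (some 2) none)]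
  else
    [strCat (strCat (PySem.Str.slice el none (some 2)) "2") (PySem.Str.slice el (some 2) none),
     strCat (strCat (PySem.Str.slice el none (some 4)) "2") (PySem.Str.slice el (some 4) none)]

-- the Cartesian-product step of B's second loop
def prodStep (cands opts : List String) : List String :=
  cands.flatMap (fun c => opts.map (fun o => pyJoin c o))

-- the product fold distributes over its accumulator
theorem foldl_prodStep_flatMap (L : List (List String)) (cands : List String) :
    L.foldl prodStep cands = cands.flatMap (fun c => L.foldl prodStep [c]) := by
  induction L generalizing cands with
  | nil => simp
  | cons opts L ih =>
      simp only [List.foldl_cons]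
      rw [ih]
      conv_rhs => rw [show (fun c => L.foldl prodStep (prodStep [c] opts))
        = fun c => (prodStep [c] opts).flatMap (fun d => L.foldl prodStep [d]) from funext fun c => ih _]
      simp [prodStep, List.flatMap_assoc]

-- B in recursive clothing: peeling one element off
theorem alt_cons (el : String) (rest : List String) (c : String) :
    add_stresses_alt (el :: rest) c
      = (optsFn el).flatMap (fun o => add_stresses_alt rest (pyJoin c o)) := by
  show (List.foldl _ _ _) = _
  rw [show ((el :: rest).foldl (fun acc e =>
        acc ++ [if (PySem.Str.startswith e "(") = false then [e]
            else if (PySem.Str.isIn " " e) = false then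
              [strCat (strCat (PySem.Str.slice e none (some 2)) "2") (PySem.Str.slice e (some 2) none)]
            else
              [strCat (strCat (PySem.Str.slice e none (some 2)) "2") (PySem.Str.slice e (some 2) none),
               strCat (strCat (PySem.Str.slice e none (some 4)) "2") (PySem.Str.slice e (some 4) none)]]) [])
      = (el :: rest).map optsFn from PySem.List.foldl_append_singleton_eq_map ..]
  show ((el :: rest).map optsFn).foldl prodStep [c] = _
  rw [List.map_cons, List.foldl_cons, foldl_prodStep_flatMap]
  have : prodStep [c] (optsFn el) = (optsFn el).map (fun o => pyJoin c o) := by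
    simp [prodStep]
  rw [this, List.flatMap_map]
  show _ = (optsFn el).flatMap (fun o => add_stresses_alt rest (pyJoin c o))
  congr 1
  funext o
  show (rest.map optsFn).foldl prodStep [pyJoin c o] = add_stresses_alt rest (pyJoin c o)
  unfold add_stresses_alt
  rw [show (rest.foldl (fun acc e =>
        acc ++ [if (PySem.Str.startswith e "(") = false then [e]
            else if (PySem.Str.isIn " " e) = false then
              [strCat (strCat (PySem.Str.slice e none (some 2)) "2") (PySem.Str.slice e (some 2) none)]
            else
              [strCat (strCat (PySem.Str.slice e none (some 2)) "2") (PySem.Str.slice e (some 2) none),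
               strCat (strCat (PySem.Str.slice e none (some 4)) "2") (PySem.Str.slice e (some 4) none)]]) [])
      = rest.map optsFn from PySem.List.foldl_append_singleton_eq_map ..]
  rfl

theorem add_stresses_eq_alt (l : List String) (c : String) :
    add_stresses l c = add_stresses_alt l c := by
  induction l generalizing c with
  | nil => rfl
  | cons el rest ih =>
      rw [alt_cons]
      unfold add_stresses optsFn
      by_cases h1 : PySem.Str.startswith el "(" = false
      · simp only [if_pos h1, PySem.List.foldl_append_singleton_eq_self, List.flatMap_cons,
          List.flatMap_nil, List.nil_append, List.append_nil, ih]
      · simp only [if_neg h1]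
        by_cases h2 : PySem.Str.isIn " " el = false
        · simp only [if_pos h2, PySem.List.foldl_append_singleton_eq_self, List.flatMap_cons,
            List.flatMap_nil, List.nil_append, List.append_nil, ih]
        · simp only [if_neg h2, PySem.List.foldl_append_singleton_eq_self, List.flatMap_cons,
            List.flatMap_nil, List.nil_append, List.append_nil, ih]

-- ===== VERDICT (by name: the statement is the Claim_ definition above) =====
theorem add_stresses_spec : Claim_equal_add_stresses := by
  intro l c _
  exact add_stresses_eq_alt l c
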